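-- pv_equiv track=rewrite | github.com/welder87/leetcode-solutions | python_solutions/lc_1299_replace_elements_with_gt_element_on_right/lc_1299_replace_elements_with_gt_element_on_right.py | replaceElementsV1
-- ===== SOURCE A (Python) =====
-- def replaceElementsV1(arr: list[int]) -> list[int]:
--     # Time complexity: O(n). Space complexity: O(1).
--     mx = -1
--     for i in range(-1, -(len(arr) + 1), -1):
--         if arr[i] > mx:
--             arr[i], mx = mx, arr[i]
--         else:
--             arr[i] = mx
--     return arr
-- ===== SOURCE B (Python) =====
-- def replaceElementsV1(arr: list[int]) -> list[int]:
--     # Divide and conquer: the answer for a segment is the answer for its left half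
--     # raised to the right half's maximum, concatenated with the answer for the
--     # right half; -1 is the floor/sentinel (and the value of the last slot).
--     def suf(seg: list[int]) -> list[int]:
--         if len(seg) <= 1:
--             return [-1] * len(seg)
--         mid = len(seg) // 2
--         left, right = seg[:mid], seg[mid:]
--         m_right = max(max(right, default=-1), -1)
--         return [max(v, m_right) for v in suf(left)] + suf(right)
--
--     arr[:] = suf(arr)
--     return arr
-- ===== Notes on version B (the rewrite author's own statement) =====
-- stated objective: alternative
-- what changed: Replaces the in-place right-to-left running-max/swap loop with a divide-and-conquer recursion: solve each half, raise the left half's answers to the right half's maximum, and concatenate; arr[:] = res writes the result back.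
import Mathlib
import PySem

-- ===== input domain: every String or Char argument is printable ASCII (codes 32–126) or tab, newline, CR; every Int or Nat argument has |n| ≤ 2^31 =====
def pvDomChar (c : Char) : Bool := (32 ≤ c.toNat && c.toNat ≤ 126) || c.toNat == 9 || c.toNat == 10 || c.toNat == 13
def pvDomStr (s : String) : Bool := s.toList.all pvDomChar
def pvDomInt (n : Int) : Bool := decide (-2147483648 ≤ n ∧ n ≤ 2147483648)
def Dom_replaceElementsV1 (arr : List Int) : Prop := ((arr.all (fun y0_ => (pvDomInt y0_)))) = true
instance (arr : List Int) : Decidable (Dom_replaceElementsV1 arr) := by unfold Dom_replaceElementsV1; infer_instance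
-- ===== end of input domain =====

-- B replaces A's in-place right-to-left running-max loop with a divide-and-conquer
-- construction of the suffix maxima (alternative algorithm, not faster in the measured
-- range). Both Pythons mutate arr in place identically; the theorems are about the
-- returned value.

-- ===== PORT A =====
-- A's for-loop over i = -1, -2, … mutates arr[i] right-to-left while threading mx;
-- ported as the obvious structural recursion that processes the rightmost cell first,
-- returning (transformed list, final mx).
def goA (arr : List Int) (mx : Int) : List Int × Int :=
  match arr with
  | [] => ([], mx)
  | x :: xs =>
    let r := goA xs mx
    if x > r.2 then (r.2 :: r.1, x) else (r.2 :: r.1, r.2)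

def replaceElementsV1 (arr : List Int) : List Int := (goA arr (-1)).1

-- ===== PORT B =====
-- def suf(seg): if len(seg) <= 1: return [-1]*len(seg)
--               mid = len(seg)//2; left, right = seg[:mid], seg[mid:]
--               m_right = max(max(right, default=-1), -1)
--               return [max(v, m_right) for v in suf(left)] + suf(right)
-- len(seg)//2 as a Nat cast (cited by sufB's termination proof)
theorem pvMidEq (seg : List Int) :
    PySem.Int.floordiv (seg.length : Int) 2 = ((seg.length / 2 : Nat) : Int) := by
  exact_mod_cast PySem.Int.floordiv_natCast seg.length 2

def sufB (seg : List Int) : List Int :=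
  if _h : seg.length ≤ 1 then
    PySem.List.pyRepeat [-1] (seg.length : Int)
  else
    let mid := PySem.Int.floordiv (seg.length : Int) 2
    let left := PySem.List.slice seg none (some mid)
    let right := PySem.List.slice seg (some mid) none
    let mRight := max (match PySem.List.max? right (fun y => y) with
                        | some m => m
                        | none => -1)  -- default=-1 on the empty slice
                      (-1)
    (sufB left).map (fun v => max v mRight) ++ sufB right
termination_by seg.length
decreasing_by
  · rw [pvMidEq seg, PySem.List.slice_to_natCast, List.length_take]
    omega
  · rw [pvMidEq seg, PySem.List.slice_from_natCast, List.length_drop]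
    omega

-- arr[:] = suf(arr); return arr
def replaceElementsV1_alt (arr : List Int) : List Int := sufB arr

-- ===== PRECONDITION & SPEC =====
def Spec_replaceElementsV1 (arr : List Int) (out : List Int) : Prop := out = replaceElementsV1_alt arr
instance (arr : List Int) (out : List Int) : Decidable (Spec_replaceElementsV1 arr out) := by unfold Spec_replaceElementsV1; infer_instance

-- ===== CLAIM (what is proved, stated in full; the proofs are below) =====
def Claim_equal_replaceElementsV1 : Prop := ∀ (arr : List Int), Dom_replaceElementsV1 arr → Spec_replaceElementsV1 arr (replaceElementsV1 arr)

-- ===== LEMMAS AND PROOFS =====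

-- ---- A-side characterisation: goA produces the suffix maxima seeded by mx ----

theorem goA_snd (xs : List Int) (mx : Int) : (goA xs mx).2 = xs.foldr max mx := by
  induction xs with
  | nil => rfl
  | cons x t ih =>
    simp only [goA, List.foldr]
    split_ifs with h <;> omega

theorem goA_fst_length (xs : List Int) (mx : Int) : (goA xs mx).1.length = xs.length := by
  induction xs with
  | nil => rfl
  | cons x t ih =>
    simp only [goA]
    split_ifs <;> simp [ih]

theorem goA_fst_getElem (xs : List Int) (mx : Int) (k : Nat) (hk : k < xs.length) :
    (goA xs mx).1[k]'(by rw [goA_fst_length]; exact hk) = (xs.drop (k + 1)).foldr max mx := by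
  induction xs generalizing k with
  | nil => simp at hk
  | cons x t ih =>
    have hfst : (goA (x :: t) mx).1 = (goA t mx).2 :: (goA t mx).1 := by
      simp only [goA]; split_ifs <;> rfl
    rcases k with _ | k
    · simp [hfst, goA_snd]
    · have hk' : k < t.length := by simpa using hk
      simp only [hfst]
      rw [List.getElem_cons_succ]
      simpa using ih k hk'

-- ---- foldr-max toolbox ----

theorem neg_one_le_foldr_max (l : List Int) : (-1 : Int) ≤ l.foldr max (-1) := by
  induction l with
  | nil => simp
  | cons x t ih => simp only [List.foldr_cons]; omega

theorem foldr_max_append (l₁ l₂ : List Int) :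
    (l₁ ++ l₂).foldr max (-1) = max (l₁.foldr max (-1)) (l₂.foldr max (-1)) := by
  induction l₁ with
  | nil =>
    have := neg_one_le_foldr_max l₂
    simp only [List.nil_append, List.foldr_nil]
    omega
  | cons x t ih =>
    simp only [List.cons_append, List.foldr_cons, ih, max_assoc]

theorem max_foldl_floor (t : List Int) (a : Int) :
    max (t.foldl max a) (-1) = (a :: t).foldr max (-1) := by
  induction t generalizing a with
  | nil => simp
  | cons x s ih =>
    rw [List.foldl_cons, ih (max a x)]
    simp only [List.foldr_cons]
    omega

-- max(max(l, default=-1), -1) is the -1-seeded suffix max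
theorem max_sentinel (l : List Int) :
    max (match PySem.List.max? l (fun y => y) with
          | some m => m
          | none => -1) (-1) = l.foldr max (-1) := by
  cases l with
  | nil => simp [PySem.List.max?]
  | cons a t =>
    rw [PySem.List.max?_id_cons]
    exact max_foldl_floor t a

-- ---- B-side characterisation ----

theorem sufB_small (seg : List Int) (h : seg.length ≤ 1) :
    sufB seg = List.replicate seg.length (-1) := by
  rw [sufB]
  simp [h, PySem.List.pyRepeat_singleton]

theorem sufB_split (seg : List Int) (h : ¬ seg.length ≤ 1) :
    sufB seg =
      (sufB (seg.take (seg.length / 2))).map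
        (fun v => max v ((seg.drop (seg.length / 2)).foldr max (-1))) ++
      sufB (seg.drop (seg.length / 2)) := by
  rw [sufB]
  simp only [h, dite_false, pvMidEq,
    PySem.List.slice_to_natCast, PySem.List.slice_from_natCast, max_sentinel]

theorem sufB_length : ∀ (n : Nat) (seg : List Int), seg.length ≤ n →
    (sufB seg).length = seg.length := by
  intro n
  induction n with
  | zero =>
    intro seg h
    have : seg.length ≤ 1 := by omega
    rw [sufB_small seg this, List.length_replicate]
  | succ n ih =>
    intro seg h
    by_cases hl : seg.length ≤ 1
    · rw [sufB_small seg hl, List.length_replicate]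
    · rw [sufB_split seg hl]
      rw [List.length_append, List.length_map]
      rw [ih _ (by simp; omega), ih _ (by simp; omega)]
      simp
      omega

theorem sufB_getElem? : ∀ (n : Nat) (seg : List Int), seg.length ≤ n →
    ∀ (k : Nat), k < seg.length →
    (sufB seg)[k]? = some ((seg.drop (k + 1)).foldr max (-1)) := by
  intro n
  induction n with
  | zero =>
    intro seg h k hk
    omega
  | succ n ih =>
    intro seg h k hk
    by_cases hl : seg.length ≤ 1
    · have hk0 : k = 0 := by omega
      subst hk0
      have hdrop : seg.drop 1 = [] := by
        cases seg with
        | nil => rfl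
        | cons a t =>
          have ht : t = [] := by
            simp only [List.length_cons] at hl
            exact List.length_eq_zero_iff.mp (by omega)
          simp [ht]
      rw [sufB_small seg hl, hdrop]
      simp [List.getElem?_replicate, hk]
    · set m := seg.length / 2 with hm
      have hmlt : m < seg.length := by omega
      have hm1 : 1 ≤ m := by omega
      have hLlen : (seg.take m).length = m := by simp; omega
      have hLsuf : (sufB (seg.take m)).length = m := by
        rw [sufB_length (seg.take m).length _ le_rfl]; exact hLlen
      rw [sufB_split seg hl]
      by_cases hkm : k < m
      · rw [List.getElem?_append_left (by rw [List.length_map, hLsuf]; exact hkm)]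
        rw [List.getElem?_map]
        rw [ih (seg.take m) (by omega) k (by omega)]
        have hsplitdrop : seg.drop (k + 1) = (seg.take m).drop (k + 1) ++ seg.drop m := by
          rw [List.drop_take]
          have h1 : seg.drop m = (seg.drop (k + 1)).drop (m - (k + 1)) := by
            rw [List.drop_drop]
            congr 1
            omega
          rw [h1, List.take_append_drop]
        rw [hsplitdrop, foldr_max_append]
        rfl
      · rw [List.getElem?_append_right (by rw [List.length_map, hLsuf]; omega)]
        rw [List.length_map, hLsuf]
        rw [ih (seg.drop m) (by simp; omega) (k - m) (by simp; omega)]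
        rw [List.drop_drop]
        congr 3
        omega

-- ===== VERDICT (by name: the statement is the Claim_ definition above) =====
theorem replaceElementsV1_spec : Claim_equal_replaceElementsV1 := by
  intro arr _
  show replaceElementsV1 arr = replaceElementsV1_alt arr
  unfold replaceElementsV1 replaceElementsV1_alt
  apply List.ext_getElem
  · rw [goA_fst_length, sufB_length arr.length arr le_rfl]
  · intro k hk hk'
    have hkn : k < arr.length := by rwa [goA_fst_length] at hk
    rw [goA_fst_getElem arr (-1) k hkn]
    have h? := sufB_getElem? arr.length arr le_rfl k hkn
    rw [List.getElem?_eq_getElem hk'] at h?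
    exact (Option.some.inj h?).symm
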